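-- pv_equiv track=rewrite | github.com/chamesh2019/CODING_CHALLENGES | 819 - The Snake Area Filling/main.py | snake_fill
-- ===== SOURCE A (Python) =====
-- def snake_fill(width: int) -> int:
--     """
--     Calculate the maximum number of food items that can be consumed by a snake in a screen area of the given width.
--     Parameters:
--     - width: the width of the screen area
--     Return:
--     - the maximum number of food items that can be consumed by the snake, with a minimum of 0
--     """
--     screen_area = width * width
--     food_count = 0
--     snake_length = 1
--     while screen_area >= snake_length:
--         food_count += 1
--         snake_length *= 2
--
--     return max(food_count - 1, 0)
-- ===== SOURCE B (Python) =====
-- def snake_fill(width: int) -> int: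
--     n = width * width
--     return max(n.bit_length() - 1, 0)
-- ===== Notes on version B (the rewrite author's own statement) =====
-- stated objective: idiomatic
-- what changed: Replaces the doubling while-loop with the closed form int.bit_length(), which directly gives the floored binary logarithm of the squared width, with the final max clamp covering the degenerate square.
import Mathlib
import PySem

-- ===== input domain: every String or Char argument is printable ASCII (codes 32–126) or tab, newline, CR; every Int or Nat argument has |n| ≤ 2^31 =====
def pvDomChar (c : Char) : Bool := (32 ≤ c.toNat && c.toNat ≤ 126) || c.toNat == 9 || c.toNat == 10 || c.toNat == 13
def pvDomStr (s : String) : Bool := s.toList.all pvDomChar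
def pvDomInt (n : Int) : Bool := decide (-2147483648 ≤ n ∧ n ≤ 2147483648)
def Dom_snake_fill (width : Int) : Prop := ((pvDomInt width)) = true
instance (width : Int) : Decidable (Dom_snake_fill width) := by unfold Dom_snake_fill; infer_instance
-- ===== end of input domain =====

-- B replaces A's doubling while-loop by the closed form bit_length: idiomatic, no loop.

-- ===== PORT A =====
-- the while-loop of A; '0 < s' only makes the recursion total (s starts at 1 and doubles, so it always holds)
def snakeLoop (area s c : Int) : Int :=
  if h : s ≤ area ∧ 0 < s then snakeLoop area (s * 2) (c + 1) else c
termination_by (area + 1 - s).toNat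
decreasing_by omega

def snake_fill (width : Int) : Int :=
  max (snakeLoop (width * width) 1 0 - 1) 0

-- ===== PORT B =====
def snake_fill_alt (width : Int) : Int :=
  max ((PySem.Int.bitLength (width * width) : Int) - 1) 0

-- ===== PRECONDITION & SPEC =====
def Spec_snake_fill (width : Int) (out : Int) : Prop := out = snake_fill_alt width
instance (width : Int) (out : Int) : Decidable (Spec_snake_fill width out) := by unfold Spec_snake_fill; infer_instance

-- ===== CLAIM (what is proved, stated in full; the proofs are below) =====
def Claim_equal_snake_fill : Prop := ∀ (width : Int), Dom_snake_fill width → Spec_snake_fill width (snake_fill width)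

-- ===== LEMMAS AND PROOFS =====

theorem snakeLoop_eq (n : Nat) : ∀ (a : Int) (k : Nat) (c : Int),
    a.toNat + 1 - k ≤ n → (2 ^ k : Int) ≤ a →
    snakeLoop a (2 ^ k) c = c + ((PySem.Int.bitLength a : Int) - k) := by
  induction n with
  | zero =>
    intro a k c hn hk
    exfalso
    have hk2 : (k : Int) < 2 ^ k := by exact_mod_cast Nat.lt_two_pow_self (n := k)
    omega
  | succ n ih =>
    intro a k c hn hk
    have hpos : (0 : Int) < 2 ^ k := by positivity
    rw [snakeLoop]
    rw [dif_pos ⟨hk, hpos⟩]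
    have hpow : (2 ^ k * 2 : Int) = 2 ^ (k + 1) := by ring
    by_cases h2 : (2 ^ (k + 1) : Int) ≤ a
    · rw [hpow, ih a (k + 1) (c + 1) (by omega) h2]
      push_cast; ring
    · -- last iteration: 2^k ≤ a < 2^(k+1), so bitLength a = k + 1
      have ha : 0 < a := lt_of_lt_of_le hpos hk
      have hnat1 : 2 ^ k ≤ a.natAbs := by
        have : (2 ^ k : Int) ≤ a.natAbs := by rwa [Int.natAbs_of_nonneg (le_of_lt ha)]
        exact_mod_cast this
      have hnat2 : a.natAbs < 2 ^ (k + 1) := by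
        have : (a.natAbs : Int) < 2 ^ (k + 1) := by
          rw [Int.natAbs_of_nonneg (le_of_lt ha)]; omega
        exact_mod_cast this
      have hb1 : a.natAbs < 2 ^ PySem.Int.bitLength a := PySem.Int.lt_two_pow_bitLength a
      have hb2 : 2 ^ (PySem.Int.bitLength a - 1) ≤ a.natAbs :=
        PySem.Int.two_pow_bitLength_le a (by omega)
      have hlt : k < PySem.Int.bitLength a := by
        have := lt_of_le_of_lt hnat1 hb1
        exact (Nat.pow_lt_pow_iff_right (by norm_num)).mp this
      have hle : PySem.Int.bitLength a - 1 < k + 1 := by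
        have := lt_of_le_of_lt hb2 hnat2
        exact (Nat.pow_lt_pow_iff_right (by norm_num)).mp this
      have hbl : PySem.Int.bitLength a = k + 1 := by omega
      rw [hpow, snakeLoop]
      rw [dif_neg (by intro ⟨h, _⟩; exact absurd h (by omega))]
      rw [hbl]; push_cast; ring

-- ===== VERDICT (by name: the statement is the Claim_ definition above) =====
theorem snake_fill_spec : Claim_equal_snake_fill := by
  intro width _
  unfold Spec_snake_fill snake_fill snake_fill_alt
  set a := width * width with ha
  have hnn : 0 ≤ a := mul_self_nonneg width
  by_cases h0 : a = 0
  · rw [h0, snakeLoop, dif_neg (by omega)]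
    simp
  · have hpos : 0 < a := lt_of_le_of_ne hnn (Ne.symm h0)
    have h1 : (2 ^ 0 : Int) ≤ a := by simpa using hpos
    have := snakeLoop_eq (a.toNat + 1) a 0 0 (by omega) h1
    simp only [pow_zero] at this
    rw [this]
    push_cast; ring_nf
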